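-- pv_equiv track=rewrite | github.com/levkropp/kevlar | tools/docker-kabi-modules/instrument-ext4.py | ensure_extern_decl
-- ===== SOURCE A (Python) =====
-- def ensure_extern_decl(lines: list[str]) -> list[str]:
--     """Insert `extern void kabi_breadcrumb(int, int, int);` near the
--     top of the file (after #include block) if not already there.
--     """
--     if any('kabi_breadcrumb' in l and 'extern' in l for l in lines):
--         return lines
--     out: list[str] = []
--     inserted = False
--     for i, line in enumerate(lines):
--         out.append(line)
--         if not inserted and i + 1 < len(lines):
--             # Find first non-include non-comment line after at least
--             # one #include.
--             saw_include = any('#include' in l for l in lines[: i + 1])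
--             nxt = lines[i + 1].strip()
--             if (
--                 saw_include
--                 and not nxt.startswith('#include')
--                 and not nxt.startswith('//')
--                 and not nxt.startswith('/*')
--                 and not nxt.startswith('*')
--                 and nxt  # not blank
--             ):
--                 out.append(
--                     '\n/* KABI_INSTRUMENT: breadcrumb declaration. */\n'
--                     'extern void kabi_breadcrumb(int line, int target_id, int err);\n\n'
--                 )
--                 inserted = True
--     return out
-- ===== SOURCE B (Python) =====
-- DECL = ('\n/* KABI_INSTRUMENT: breadcrumb declaration. */\n'
--         'extern void kabi_breadcrumb(int line, int target_id, int err);\n\n')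
--
--
-- def ensure_extern_decl(lines: list[str]) -> list[str]:
--     """Insert the breadcrumb extern after the #include block if absent:
--     locate the splice index, then splice once."""
--     if any('kabi_breadcrumb' in l and 'extern' in l for l in lines):
--         return lines
--     saw_include = False
--     for j in range(1, len(lines)):
--         saw_include = saw_include or '#include' in lines[j - 1]
--         nxt = lines[j].strip()
--         if saw_include and nxt and not nxt.startswith(('#include', '//', '/*', '*')):
--             return lines[:j] + [DECL] + lines[j:]
--     return list(lines)
-- ===== Notes on version B (the rewrite author's own statement) =====
-- stated objective: faster
-- what changed: Replaces the per-line accumulate-with-inserted-flag build (which rescans the whole prefix for '#include' at every step) with a single locate-then-splice pass that carries the include flag incrementally and returns lines[:j] + [DECL] + lines[j:].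
import Mathlib
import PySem

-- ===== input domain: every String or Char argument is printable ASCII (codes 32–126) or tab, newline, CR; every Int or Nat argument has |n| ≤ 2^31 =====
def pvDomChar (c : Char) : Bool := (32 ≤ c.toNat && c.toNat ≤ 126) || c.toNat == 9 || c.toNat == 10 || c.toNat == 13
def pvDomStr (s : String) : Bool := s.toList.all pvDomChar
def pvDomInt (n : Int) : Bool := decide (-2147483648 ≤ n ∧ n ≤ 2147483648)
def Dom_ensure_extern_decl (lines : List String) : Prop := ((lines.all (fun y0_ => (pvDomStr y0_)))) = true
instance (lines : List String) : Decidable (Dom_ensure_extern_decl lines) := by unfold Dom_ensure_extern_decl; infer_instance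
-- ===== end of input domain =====

-- B replaces A's accumulate-with-flag loop (prefix rescans included) by a locate-index-then-splice pass; equivalence of return values proved below.

def kabiDecl : String :=
  "\n/* KABI_INSTRUMENT: breadcrumb declaration. */\nextern void kabi_breadcrumb(int line, int target_id, int err);\n\n"

-- ===== PORT A =====
-- body of A's for-loop, as a named step function for the foldl over enumerate(lines)
def aStep (lines : List String) (st : List String × Bool) (p : Int × String) : List String × Bool :=
  let out := st.1 ++ [p.2]
  if !st.2 && p.1 + 1 < (lines.length : Int) then
    let saw_include := (PySem.List.slice lines none (some (p.1 + 1))).any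
      (fun l => PySem.Str.isIn "#include" l)
    let nxt := PySem.Str.strip (PySem.List.pyGetD lines (p.1 + 1) "")
    if saw_include && !PySem.Str.startswith nxt "#include" && !PySem.Str.startswith nxt "//"
        && !PySem.Str.startswith nxt "/*" && !PySem.Str.startswith nxt "*" && nxt != "" then
      (out ++ [kabiDecl], true)
    else (out, st.2)
  else (out, st.2)

def ensure_extern_decl (lines : List String) : List String :=
  if lines.any (fun l => PySem.Str.isIn "kabi_breadcrumb" l && PySem.Str.isIn "extern" l) then
    lines
  else
    ((PySem.List.enumerate lines 0).foldl (aStep lines) ([], false)).1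

-- ===== PORT B =====
def goodLine (nxt : String) : Bool :=
  nxt != "" && !(PySem.Str.startswith nxt "#include" || PySem.Str.startswith nxt "//"
    || PySem.Str.startswith nxt "/*" || PySem.Str.startswith nxt "*")

-- the locate loop: first j in [j, lines.length) whose stripped line is insertable after an include
def findIdx (lines : List String) (j : Nat) (saw : Bool) : Option Nat :=
  if j < lines.length then
    let saw' := saw || PySem.Str.isIn "#include" (lines.getD (j - 1) "")
    if saw' && goodLine (PySem.Str.strip (lines.getD j "")) then some j
    else findIdx lines (j + 1) saw'
  else none
termination_by lines.length - j

def ensure_extern_decl_alt (lines : List String) : List String :=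
  if lines.any (fun l => PySem.Str.isIn "kabi_breadcrumb" l && PySem.Str.isIn "extern" l) then
    lines
  else
    match findIdx lines 1 false with
    | some j => lines.take j ++ kabiDecl :: lines.drop j
    | none => lines

-- ===== PRECONDITION & SPEC =====
def Spec_ensure_extern_decl (lines : List String) (out : List String) : Prop := out = ensure_extern_decl_alt lines
instance (lines : List String) (out : List String) : Decidable (Spec_ensure_extern_decl lines out) := by unfold Spec_ensure_extern_decl; infer_instance

-- ===== CLAIM (what is proved, stated in full; the proofs are below) =====
def Claim_equal_ensure_extern_decl : Prop := ∀ (lines : List String), Dom_ensure_extern_decl lines → Spec_ensure_extern_decl lines (ensure_extern_decl lines)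

-- ===== LEMMAS AND PROOFS =====

-- A's insertion condition at loop index i, cleaned up
def Pb (lines : List String) (i : Int) : Bool :=
  decide (i + 1 < (lines.length : Int)) &&
  ((PySem.List.slice lines none (some (i + 1))).any (fun l => PySem.Str.isIn "#include" l) &&
   (let nxt := PySem.Str.strip (PySem.List.pyGetD lines (i + 1) "")
    !PySem.Str.startswith nxt "#include" && !PySem.Str.startswith nxt "//"
      && !PySem.Str.startswith nxt "/*" && !PySem.Str.startswith nxt "*" && nxt != ""))

lemma aStep_true (lines : List String) (out : List String) (p : Int × String) :
    aStep lines (out, true) p = (out ++ [p.2], true) := by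
  simp [aStep]

lemma aStep_false (lines : List String) (out : List String) (p : Int × String) :
    aStep lines (out, false) p =
      if Pb lines p.1 then (out ++ [p.2, kabiDecl], true) else (out ++ [p.2], false) := by
  simp only [aStep, Pb, Bool.not_false, Bool.true_and]
  by_cases h1 : p.1 + 1 < (lines.length : Int) <;> simp [h1] <;> split_ifs <;> simp_all

lemma foldl_aStep_true (lines : List String) (ps : List (Int × String)) (out : List String) :
    ps.foldl (aStep lines) (out, true) = (out ++ ps.map (·.2), true) := by
  induction ps generalizing out with
  | nil => simp
  | cons p ps ih => simp [aStep_true, ih]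

-- the result of A's loop starting from inserted = false, as direct recursion
def gSpec (lines : List String) : List (Int × String) → List String
  | [] => []
  | p :: ps => if Pb lines p.1 then p.2 :: kabiDecl :: ps.map (·.2) else p.2 :: gSpec lines ps

lemma foldl_aStep_false (lines : List String) (ps : List (Int × String)) (out : List String) :
    (ps.foldl (aStep lines) (out, false)).1 = out ++ gSpec lines ps := by
  induction ps generalizing out with
  | nil => simp [gSpec]
  | cons p ps ih =>
    simp only [List.foldl_cons, aStep_false, gSpec]
    by_cases h : Pb lines p.1
    · simp [h, foldl_aStep_true]
    · simp [h, ih]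

def incAny (lines : List String) (k : Nat) : Bool :=
  (lines.take k).any (fun l => PySem.Str.isIn "#include" l)

lemma bool_re (a b c e ne : Bool) :
    (!a && !b && !c && !e && ne) = (ne && !(a || b || c || e)) := by
  cases a <;> cases b <;> cases c <;> cases e <;> cases ne <;> rfl

lemma Pb_nat (lines : List String) (k : Nat) :
    Pb lines (k : Int) =
      (decide (k + 1 < lines.length) &&
        (incAny lines (k + 1) && goodLine (PySem.Str.strip (lines.getD (k + 1) "")))) := by
  have hc : ((k : Int) + 1) = ((k + 1 : Nat) : Int) := by push_cast; ring
  have hd : decide (((k + 1 : Nat) : Int) < (lines.length : Int)) =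
      decide (k + 1 < lines.length) := decide_eq_decide.mpr (by exact_mod_cast Iff.rfl)
  simp only [Pb, incAny, goodLine, hc, PySem.List.slice_to_natCast, PySem.List.pyGetD_natCast, hd]
  rw [bool_re]

lemma incAny_succ (lines : List String) (k : Nat) (hk : k < lines.length) :
    incAny lines (k + 1) = (incAny lines k || PySem.Str.isIn "#include" (lines.getD k "")) := by
  have h1 : lines.take (k + 1) = lines.take k ++ [lines[k]] := by
    rw [List.take_succ, lines.getElem?_eq_getElem hk]; rfl
  have h2 : lines.getD k "" = lines[k] := List.getD_eq_getElem lines "" hk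
  unfold incAny
  rw [h1, h2, List.any_append]
  simp

lemma findIdx_ge (lines : List String) (j : Nat) (saw : Bool) (j' : Nat)
    (h : findIdx lines j saw = some j') : j ≤ j' := by
  rw [findIdx] at h
  by_cases hj : j < lines.length
  · simp only [hj, if_true] at h
    split at h
    · cases h; omega
    · have := findIdx_ge lines (j + 1) _ j' h
      omega
  · simp [hj] at h
termination_by lines.length - j
decreasing_by omega

-- main bridge: A's loop tail from index k equals B's locate-then-splice from j = k+1
lemma main_bridge (lines : List String) (k : Nat) :
    gSpec lines (PySem.List.enumerate (lines.drop k) k) =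
      (match findIdx lines (k + 1) (incAny lines k) with
       | some j => (lines.drop k).take (j - k) ++ kabiDecl :: lines.drop j
       | none => lines.drop k) := by
  induction hn : lines.length - k generalizing k with
  | zero =>
    have h1 : lines.drop k = [] := List.drop_eq_nil_of_le (by omega)
    have h2 : findIdx lines (k + 1) (incAny lines k) = none := by
      rw [findIdx, if_neg (by omega)]
    simp [h1, h2, PySem.List.enumerate_nil, gSpec]
  | succ m ih =>
    have hk : k < lines.length := by omega
    obtain ⟨x, hx⟩ : ∃ x, lines.drop k = x :: lines.drop (k + 1) := by
      exact ⟨lines[k], List.drop_eq_getElem_cons hk⟩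
    have hsaw : (incAny lines k || PySem.Str.isIn "#include" (lines.getD ((k + 1) - 1) "")) =
        incAny lines (k + 1) := by
      simpa using (incAny_succ lines k hk).symm
    have hc1 : (k : Int) + 1 = ((k + 1 : Nat) : Int) := by push_cast; ring
    rw [hx, PySem.List.enumerate_cons]
    simp only [gSpec, Pb_nat, hc1]
    by_cases hP : (decide (k + 1 < lines.length) &&
        (incAny lines (k + 1) && goodLine (PySem.Str.strip (lines.getD (k + 1) "")))) = true
    · -- insertion fires at j = k + 1
      have hP' := hP
      rw [Bool.and_eq_true] at hP'
      have hlt : k + 1 < lines.length := of_decide_eq_true hP'.1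
      have hfind : findIdx lines (k + 1) (incAny lines k) = some (k + 1) := by
        rw [findIdx]
        simp only [hlt, if_true, hsaw, hP'.2, if_true]
      rw [hfind]
      simp only [hP, if_true]
      have h1 : (k + 1) - k = 1 := by omega
      simp [PySem.List.map_snd_enumerate, h1]
    · -- no insertion at k: recurse
      simp only [hP, Bool.false_eq_true, if_false]
      have hih := ih (k + 1) (by omega)
      rw [hih]
      have hfind : findIdx lines (k + 1) (incAny lines k) =
          findIdx lines (k + 2) (incAny lines (k + 1)) := by
        by_cases hlt : k + 1 < lines.length
        · have hcond : (incAny lines (k + 1) &&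
              goodLine (PySem.Str.strip (lines.getD (k + 1) ""))) = false := by
            cases hb : (incAny lines (k + 1) &&
                goodLine (PySem.Str.strip (lines.getD (k + 1) ""))) with
            | false => rfl
            | true =>
              exact absurd (by simp only [hb, Bool.and_true, decide_eq_true_eq]; exact hlt) hP
          rw [findIdx]
          simp only [hlt, if_true, hsaw, hcond, Bool.false_eq_true, if_false]
        · have e1 : findIdx lines (k + 1) (incAny lines k) = none := by
            rw [findIdx, if_neg hlt]
          have e2 : findIdx lines (k + 2) (incAny lines (k + 1)) = none := by
            rw [findIdx, if_neg (by omega)]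
          rw [e1, e2]
      rw [hfind]
      cases hres : findIdx lines (k + 2) (incAny lines (k + 1)) with
      | none => rfl
      | some j =>
        have hge : k + 2 ≤ j := findIdx_ge lines (k + 2) _ j hres
        have h1 : j - k = (j - (k + 1)) + 1 := by omega
        simp only [h1, List.take_succ_cons, List.cons_append]

-- ===== VERDICT (by name: the statement is the Claim_ definition above) =====
theorem ensure_extern_decl_spec : Claim_equal_ensure_extern_decl := by
  intro lines _
  unfold Spec_ensure_extern_decl ensure_extern_decl ensure_extern_decl_alt
  cases hearly : lines.any
      (fun l => PySem.Str.isIn "kabi_breadcrumb" l && PySem.Str.isIn "extern" l) with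
  | true => simp
  | false =>
    simp only [Bool.false_eq_true, if_false]
    rw [foldl_aStep_false]
    have hinc : incAny lines 0 = false := rfl
    have h0 := main_bridge lines 0
    rw [hinc] at h0
    simp only [List.drop_zero, Nat.cast_zero, Nat.sub_zero] at h0
    simpa using h0
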